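-- pv_equiv track=rewrite | github.com/MohammadAlshamsi/SaveSmart | SDP/MobileApp/main.py | greedy_algo
-- ===== SOURCE A (Python) =====
-- def greedy_algo(mystuff, limit):
--
--     # Copy the dictionary to work on duplicate
--     copy_stuff = dict(mystuff)
--     # Initialize an output list
--     outlist = []
--
--     def keywithmaxval(d):
--      #a) create a list of the dict's keys and values;
--      #b) return the key with the max value
--         v=list(d.values())
--         k=list(d.keys())
--         return k[v.index(max(v))]
--
--
--     def greedy_grab(mydict):
--         result = []
--         total = 0
--         while total <= limit and len(mydict) > 0:
--             maxkey=keywithmaxval(mydict)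
--             result.append(maxkey)
--             total += mydict[maxkey]
--             del mydict[maxkey]
--         return result
--
--     def update_dict(mydict, mylist):
--         for i in mylist:
--             del mydict[i]
--         return mydict
--
--     while len(copy_stuff) > 0:
--         outlist.append(greedy_grab(copy_stuff))
--
--
--     return outlist
-- ===== SOURCE B (Python) =====
-- def greedy_algo(mystuff, limit):
--     # Stable descending sort by value, then one linear pass cutting a batch
--     # whenever the running total has exceeded the limit.
--     order = sorted(dict(mystuff).items(), key=lambda kv: -kv[1])
--     out = []
--     batch = []
--     total = 0
--     for k, v in order:
--         if total > limit:
--             out.append(batch)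
--             batch = []
--             total = 0
--         batch.append(k)
--         total += v
--     if batch:
--         out.append(batch)
--     return out
-- ===== Notes on version B (the rewrite author's own statement) =====
-- stated objective: faster
-- what changed: Replaced A's repeated O(n) max-extraction from a shrinking dict (selection-sort style) by one stable descending sort by value followed by a single linear pass that cuts a batch when the running sum has exceeded the limit.
import Mathlib
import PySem

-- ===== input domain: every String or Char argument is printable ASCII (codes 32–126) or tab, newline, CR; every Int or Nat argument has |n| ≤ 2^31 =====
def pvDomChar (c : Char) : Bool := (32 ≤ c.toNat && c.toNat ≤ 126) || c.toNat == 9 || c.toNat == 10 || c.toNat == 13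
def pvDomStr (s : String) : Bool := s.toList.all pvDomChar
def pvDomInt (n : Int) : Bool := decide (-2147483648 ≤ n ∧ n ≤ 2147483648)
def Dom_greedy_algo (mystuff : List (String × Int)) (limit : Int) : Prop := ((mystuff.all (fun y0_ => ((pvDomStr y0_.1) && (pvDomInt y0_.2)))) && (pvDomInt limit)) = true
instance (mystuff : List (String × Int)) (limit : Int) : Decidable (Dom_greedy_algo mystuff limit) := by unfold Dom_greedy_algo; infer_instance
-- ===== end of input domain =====

-- B replaces A's repeated max-extraction from a shrinking dict by one stable
-- descending sort by value plus a single linear batching pass (same return value).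


-- ===== PORT A =====
-- keywithmaxval: v = values, k = keys, return k[v.index(max(v))]
-- (max/index/k[i] can raise only on an empty dict, which the loop guards never reach;
--  those raise-cases are none here)
def keywithmaxval (d : PySem.Dict String Int) : Option String :=
  let v := d.values
  let k := d.keys
  match PySem.List.max? v (fun x => x) with
  | none => none
  | some m =>
    match PySem.List.index? v m with
    | none => none
    | some i => PySem.List.pyGet? k (i : Int)

-- greedy_grab: while total <= limit and len(mydict) > 0: take the max key, add
-- its value, delete it.  Fuel bounds the loop (each pass deletes one key).
def greedyGrab (limit : Int) : Nat → Int → PySem.Dict String Int → List String →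
    List String × PySem.Dict String Int
  | 0, _, d, res => (res, d)
  | fuel+1, total, d, res =>
    if total ≤ limit ∧ 0 < d.size then
      match keywithmaxval d with
      | none => (res, d)
      | some k =>
        match d.get? k with
        | none => (res, d)
        | some v => greedyGrab limit fuel (total + v) (d.erase k) (res ++ [k])
    else (res, d)

-- outer loop: while len(copy_stuff) > 0: outlist.append(greedy_grab(copy_stuff)).
-- Fuel bounds the loop; when limit < 0 and the dict is nonempty the Python loops
-- forever (excluded by Pre_), so exhausting fuel there claims nothing.
def greedyOuter (limit : Int) : Nat → PySem.Dict String Int → List (List String) →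
    List (List String)
  | 0, _, out => out
  | fuel+1, d, out =>
    if 0 < d.size then
      let p := greedyGrab limit (d.size + 1) 0 d []
      greedyOuter limit fuel p.2 (out ++ [p.1])
    else out

def greedy_algo (mystuff : List (String × Int)) (limit : Int) : List (List String) :=
  let d := PySem.Dict.ofList mystuff
  greedyOuter limit (d.size + 1) d []

-- ===== PORT B =====
-- one step of B's linear pass: flush the batch if the running total exceeded
-- the limit, then append the current key and add its value
def bStep (limit : Int) (st : List (List String) × List String × Int)
    (kv : String × Int) : List (List String) × List String × Int :=
  let st' := if limit < st.2.2 then (st.1 ++ [st.2.1], ([] : List String), (0 : Int)) else st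
  (st'.1, st'.2.1 ++ [kv.1], st'.2.2 + kv.2)

def greedy_algo_alt (mystuff : List (String × Int)) (limit : Int) : List (List String) :=
  let order := PySem.List.sorted (PySem.Dict.ofList mystuff).items (fun kv => -kv.2)
  let res := order.foldl (bStep limit) ([], [], 0)
  if res.2.1 ≠ [] then res.1 ++ [res.2.1] else res.1

-- ===== PRECONDITION & SPEC =====
-- Pre_ excludes exactly the inputs on which A never returns: with a nonempty
-- dict and a negative limit, greedy_grab grabs nothing and the outer
-- 'while len(copy_stuff) > 0' loops forever.
def Pre_greedy_algo (mystuff : List (String × Int)) (limit : Int) : Prop :=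
  mystuff = [] ∨ 0 ≤ limit
instance (mystuff : List (String × Int)) (limit : Int) : Decidable (Pre_greedy_algo mystuff limit) := by unfold Pre_greedy_algo; infer_instance

def pvWitness_greedy_algo : (List (String × Int)) × Int := ([("a", 3), ("b", 5), ("c", 5), ("d", 1)], 6)

def Spec_greedy_algo (mystuff : List (String × Int)) (limit : Int) (out : List (List String)) : Prop := out = greedy_algo_alt mystuff limit
instance (mystuff : List (String × Int)) (limit : Int) (out : List (List String)) : Decidable (Spec_greedy_algo mystuff limit out) := by unfold Spec_greedy_algo; infer_instance

-- ===== CLAIM (what is proved, stated in full; the proofs are below) =====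
def Claim_equal_greedy_algo : Prop := ∀ (mystuff : List (String × Int)) (limit : Int), Dom_greedy_algo mystuff limit → Pre_greedy_algo mystuff limit → Spec_greedy_algo mystuff limit (greedy_algo mystuff limit)

-- ===== LEMMAS AND PROOFS =====

-- first pair attaining the maximal value (ties: the earlier pair)
def fm : List (String × Int) → Option (String × Int)
  | [] => none
  | p :: t =>
    match fm t with
    | none => some p
    | some q => if q.2 > p.2 then some q else some p

-- one greedy pass over an (already sorted) list: take elements while the
-- running total is ≤ limit; returns (keys taken, remainder)
def grabL (limit : Int) : List (String × Int) → Int → List String × List (String × Int)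
  | [], _ => ([], [])
  | p :: t, total =>
    if total ≤ limit then
      let r := grabL limit t (total + p.2)
      (p.1 :: r.1, r.2)
    else ([], p :: t)

-- repeated greedy passes (fuel-bounded)
def batchesF (limit : Int) : Nat → List (String × Int) → List (List String)
  | 0, _ => []
  | fuel+1, l =>
    if l = [] then []
    else
      let r := grabL limit l 0
      r.1 :: batchesF limit fuel r.2

def sItems (d : PySem.Dict String Int) : List (String × Int) :=
  PySem.List.sorted d.items (fun p => -p.2) false

theorem fm_eq_none_iff (l : List (String × Int)) : fm l = none ↔ l = [] := by
  cases l with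
  | nil => simp [fm]
  | cons p t =>
    simp only [fm]
    cases fm t with
    | none => simp
    | some q => simp only []; split <;> simp

theorem fm_mem {l : List (String × Int)} {m : String × Int} (h : fm l = some m) : m ∈ l := by
  induction l with
  | nil => simp [fm] at h
  | cons p t ih =>
    simp only [fm] at h
    cases hf : fm t with
    | none => rw [hf] at h; simp at h; simp [h]
    | some q =>
      rw [hf] at h
      by_cases hlt : q.2 > p.2
      · simp [hlt] at h; subst h; exact List.mem_cons_of_mem _ (ih hf)
      · simp [hlt] at h; simp [h]

theorem fm_isMax' : ∀ (l : List (String × Int)) (m : String × Int), fm l = some m →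
    ∀ y ∈ l, y.2 ≤ m.2 := by
  intro l
  induction l with
  | nil => intro m h; simp [fm] at h
  | cons p t ih =>
    intro m h
    simp only [fm] at h
    cases hf : fm t with
    | none =>
      rw [hf] at h; simp at h; subst h
      intro y hy
      rcases List.mem_cons.mp hy with rfl | hy
      · exact le_refl _
      · rw [(fm_eq_none_iff t).mp hf] at hy; simp at hy
    | some q =>
      rw [hf] at h
      by_cases hlt : q.2 > p.2
      · simp [hlt] at h; subst h
        intro y hy
        rcases List.mem_cons.mp hy with rfl | hy
        · exact le_of_lt hlt
        · exact ih q hf y hy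
      · simp [hlt] at h; subst h
        intro y hy
        rcases List.mem_cons.mp hy with rfl | hy
        · exact le_refl _
        · exact le_trans (ih q hf y hy) (not_lt.mp hlt)

theorem fm_isMax {l : List (String × Int)} {m : String × Int} (h : fm l = some m) :
    ∀ y ∈ l, y.2 ≤ m.2 := fm_isMax' l m h

theorem fm_append (l : List (String × Int)) (x : String × Int) :
    fm (l ++ [x]) = match fm l with
      | none => some x
      | some q => if x.2 > q.2 then some x else some q := by
  induction l with
  | nil => simp [fm]
  | cons p t ih =>
    simp only [List.cons_append, fm, ih]
    cases hf : fm t with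
    | none => simp
    | some q =>
      by_cases h1 : x.2 > q.2 <;> by_cases h2 : q.2 > p.2 <;>
        by_cases h3 : x.2 > p.2 <;> simp [h1, h2, h3] <;> omega

theorem fm_spec {l : List (String × Int)} {m : String × Int} (h : fm l = some m) :
    ∃ i : Nat, l[i]? = some m ∧ ∀ j < i, ∀ p : String × Int, l[j]? = some p → p.2 < m.2 := by
  induction l with
  | nil => simp [fm] at h
  | cons p t ih =>
    simp only [fm] at h
    cases hf : fm t with
    | none =>
      rw [hf] at h; simp at h; subst h
      exact ⟨0, by simp, by omega⟩
    | some q =>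
      rw [hf] at h
      by_cases hlt : q.2 > p.2
      · simp [hlt] at h; subst h
        obtain ⟨i, hi, hfirst⟩ := ih hf
        refine ⟨i + 1, by simpa using hi, ?_⟩
        intro j hj r hr
        cases j with
        | zero => simp at hr; subst hr; exact hlt
        | succ j' => simp at hr; exact hfirst j' (by omega) r (by simpa using hr)
      · simp [hlt] at h; subst h
        exact ⟨0, by simp, by omega⟩

-- first occurrence ⇒ idxOf?
theorem idxOf?_of_first (vs : List Int) (i : Nat) (v : Int)
    (hi : vs[i]? = some v) (hfirst : ∀ j < i, ∀ w : Int, vs[j]? = some w → w ≠ v) :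
    List.idxOf? v vs = some i := by
  induction vs generalizing i with
  | nil => simp at hi
  | cons a t ih =>
    cases i with
    | zero =>
      simp at hi; subst hi
      simp [List.idxOf?_cons]
    | succ i' =>
      have ha : a ≠ v := hfirst 0 (Nat.succ_pos _) a (by simp)
      have : List.idxOf? v t = some i' := by
        apply ih
        · simpa using hi
        · intro j hj w hw
          exact hfirst (j + 1) (by omega) w (by simpa using hw)
      simp [List.idxOf?_cons, ha, this]

theorem max?_values_eq {l : List (String × Int)} {m : String × Int} (h : fm l = some m) :
    PySem.List.max? (l.map Prod.snd) (fun x => x) = some m.2 := by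
  cases hM : PySem.List.max? (l.map Prod.snd) (fun x => x) with
  | none =>
    rw [PySem.List.max?_eq_none_iff] at hM
    simp at hM
    subst hM; simp [fm] at h
  | some M =>
    have hMmem := PySem.List.max?_mem hM
    obtain ⟨p, hp, hpv⟩ := List.mem_map.mp hMmem
    have h1 : M ≤ m.2 := hpv ▸ fm_isMax h p hp
    have h2 : m.2 ≤ M := PySem.List.max?_isMax hM m.2 (List.mem_map.mpr ⟨m, fm_mem h, rfl⟩)
    rw [le_antisymm h1 h2]

theorem keywithmaxval_eq {d : PySem.Dict String Int} {m : String × Int}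
    (h : fm d.items = some m) : keywithmaxval d = some m.1 := by
  obtain ⟨i, hi, hfirst⟩ := fm_spec h
  have hv : d.values = d.items.map Prod.snd := rfl
  have hk : d.keys = d.items.map Prod.fst := rfl
  have hmax := max?_values_eq h
  have hidx : List.idxOf? m.2 (d.items.map Prod.snd) = some i := by
    apply idxOf?_of_first
    · simp [List.getElem?_map, hi]
    · intro j hj w hw
      rw [List.getElem?_map] at hw
      cases hjw : d.items[j]? with
      | none => rw [hjw] at hw; simp at hw
      | some p =>
        rw [hjw] at hw; simp at hw
        rw [← hw]
        exact ne_of_lt (hfirst j hj p hjw)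
  show (match PySem.List.max? d.values (fun x => x) with
    | none => none
    | some mv =>
      match PySem.List.index? d.values mv with
      | none => none
      | some i => PySem.List.pyGet? d.keys (i : Int)) = some m.1
  rw [hv, hk, hmax]
  show (match PySem.List.index? (d.items.map Prod.snd) m.2 with
    | none => none
    | some i => PySem.List.pyGet? (d.items.map Prod.fst) (i : Int)) = some m.1
  have : PySem.List.index? (d.items.map Prod.snd) m.2 = some i := by
    simpa [PySem.List.index?] using hidx
  rw [this]
  show PySem.List.pyGet? (d.items.map Prod.fst) (i : Int) = some m.1
  rw [PySem.List.pyGet?_natCast, List.getElem?_map, hi]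
  rfl

-- snoc form of PySem's stable insertion sort
theorem sorted_snoc (l : List (String × Int)) (x : String × Int) :
    PySem.List.sorted (l ++ [x]) (fun p => -p.2) false =
      PySem.List.insertBy (fun a b => decide ((fun p : String × Int => -p.2) a < (fun p : String × Int => -p.2) b)) x
        (PySem.List.sorted l (fun p => -p.2) false) := by
  rw [PySem.List.sorted_eq_foldl_insertBy, PySem.List.sorted_eq_foldl_insertBy,
    List.foldl_append]
  rfl

-- CRUX: the stable sort extracts the first maximal-value pair at the head
theorem sorted_extract {l : List (String × Int)} {m : String × Int} (h : fm l = some m) :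
    PySem.List.sorted l (fun p => -p.2) false =
      m :: PySem.List.sorted (l.erase m) (fun p => -p.2) false := by
  induction l using List.reverseRecOn with
  | nil => simp [fm] at h
  | append_singleton l x ih =>
    rw [fm_append] at h
    cases hf : fm l with
    | none =>
      rw [hf] at h; simp at h; subst h
      have hl : l = [] := (fm_eq_none_iff l).mp hf
      subst hl
      simp [PySem.List.sorted, PySem.List.insertBy, List.erase_cons_head]
    | some q =>
      rw [hf] at h
      by_cases hlt : x.2 > q.2
      · -- x is the new strict maximum: it goes to the front
        simp [hlt] at h; subst h
        have hxl : x ∉ l := fun hx => absurd (fm_isMax hf x hx) (by omega)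
        have herase : (l ++ [x]).erase x = l := by
          rw [List.erase_append, if_neg hxl]
          simp [List.erase_cons_head]
        rw [herase, sorted_snoc]
        have hne : l ≠ [] := by rintro rfl; simp [fm] at hf
        cases hs : PySem.List.sorted l (fun p => -p.2) false with
        | nil => exact absurd ((PySem.List.sorted_eq_nil_iff _ _ _).mp hs) hne
        | cons hd tl =>
          have hhd : hd ∈ l := (PySem.List.mem_sorted _ _ _ _).mp (hs ▸ List.mem_cons_self)
          have hbef : -x.2 < -hd.2 := by have := fm_isMax hf hd hhd; omega
          simp [PySem.List.insertBy, hbef]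
      · -- the first maximum stays in l
        simp [hlt] at h; subst h
        have hmem : q ∈ l := fm_mem hf
        have herase : (l ++ [x]).erase q = l.erase q ++ [x] := by
          rw [List.erase_append, if_pos hmem]
        rw [herase, sorted_snoc, sorted_snoc, ih hf]
        have hbef : ¬ (-x.2 < -q.2) := by omega
        simp [PySem.List.insertBy, hbef]

-- dict erase = list erase of the found pair, under unique keys
theorem filter_eq_erase {l : List (String × Int)} {m : String × Int}
    (hnd : (l.map Prod.fst).Nodup) (hm : m ∈ l) :
    l.filter (fun p => !(p.1 == m.1)) = l.erase m := by
  induction l with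
  | nil => simp at hm
  | cons p t ih =>
    simp only [List.map_cons, List.nodup_cons] at hnd
    by_cases hpm : p = m
    · subst hpm
      rw [List.erase_cons_head]
      rw [List.filter_cons]
      simp only [beq_self_eq_true, Bool.not_true, if_neg (by simp : ¬ (false = true))]
      apply List.filter_eq_self.mpr
      intro q hq
      have : q.1 ≠ p.1 := fun he => hnd.1 (he ▸ List.mem_map.mpr ⟨q, hq, rfl⟩)
      simp [this]
    · have hmt : m ∈ t := by
        rcases List.mem_cons.mp hm with rfl | h
        · exact absurd rfl hpm
        · exact h
      have hne : p.1 ≠ m.1 := fun he =>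
        hnd.1 (he ▸ List.mem_map.mpr ⟨m, hmt, rfl⟩)
      rw [List.erase_cons_tail (by simp [hpm])]
      rw [List.filter_cons, if_pos (by simp [hne]), ih hnd.2 hmt]

theorem erase_items {d : PySem.Dict String Int} {m : String × Int}
    (hnd : d.keys.Nodup) (hm : m ∈ d.items) :
    (d.erase m.1).items = d.items.erase m := by
  show d.items.filter (fun p => !(p.1 == m.1)) = d.items.erase m
  exact filter_eq_erase hnd hm

theorem nodup_keys_erase (d : PySem.Dict String Int) (k : String)
    (hnd : d.keys.Nodup) : (d.erase k).keys.Nodup := by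
  have hsub : (d.erase k).items.Sublist d.items := List.filter_sublist
  exact hnd.sublist (hsub.map Prod.fst)

theorem grabL_not_le {limit total : Int} (h : ¬ total ≤ limit) (l : List (String × Int)) :
    grabL limit l total = ([], l) := by
  cases l <;> simp [grabL, h]

theorem grabL_rest_len (limit : Int) (l : List (String × Int)) (total : Int) :
    (grabL limit l total).2.length ≤ l.length := by
  induction l generalizing total with
  | nil => simp [grabL]
  | cons p t ih =>
    by_cases h : total ≤ limit
    · simp only [grabL, if_pos h]
      exact le_trans (ih _) (Nat.le_succ _)
    · simp [grabL, if_neg h]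

theorem grabL_rest_lt {limit : Int} (hlim : 0 ≤ limit) {l : List (String × Int)}
    (hne : l ≠ []) : (grabL limit l 0).2.length < l.length := by
  cases l with
  | nil => exact absurd rfl hne
  | cons p t =>
    simp only [grabL, if_pos hlim]
    exact Nat.lt_succ_of_le (grabL_rest_len _ _ _)

theorem batchesF_fuel {limit : Int} (hlim : 0 ≤ limit) :
    ∀ n (l : List (String × Int)) fuel fuel', l.length ≤ n →
      l.length ≤ fuel → l.length ≤ fuel' →
      batchesF limit fuel l = batchesF limit fuel' l := by
  intro n
  induction n with
  | zero =>
    intro l fuel fuel' hn _ _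
    have : l = [] := List.eq_nil_of_length_eq_zero (Nat.le_zero.mp hn)
    subst this
    cases fuel <;> cases fuel' <;> simp [batchesF]
  | succ n ih =>
    intro l fuel fuel' hn hf hf'
    cases l with
    | nil => cases fuel <;> cases fuel' <;> simp [batchesF]
    | cons p t =>
      cases fuel with
      | zero => simp at hf
      | succ f =>
        cases fuel' with
        | zero => simp at hf'
        | succ f' =>
          simp only [batchesF, if_neg (by simp : ¬ (p :: t : List (String × Int)) = [])]
          have hlt := grabL_rest_lt hlim (l := p :: t) (by simp)
          simp only [List.length_cons] at hlt hn hf hf'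
          exact congrArg _ (ih _ f f' (by omega) (by omega) (by omega))

-- ===== A-side: the grab pass equals grabL on the sorted items =====
theorem grab_eq (limit : Int) :
    ∀ fuel (d : PySem.Dict String Int) (total : Int) (res : List String),
      d.keys.Nodup → d.size ≤ fuel →
      ∃ d', greedyGrab limit fuel total d res =
          (res ++ (grabL limit (sItems d) total).1, d') ∧
        d'.keys.Nodup ∧ sItems d' = (grabL limit (sItems d) total).2 := by
  intro fuel
  induction fuel with
  | zero =>
    intro d total res hnd hsz
    have : d.items = [] := List.eq_nil_of_length_eq_zero (Nat.le_zero.mp hsz)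
    have hs : sItems d = [] := by rw [sItems, this]; rfl
    exact ⟨d, by simp [greedyGrab, hs, grabL], hnd, by simp [hs, grabL]⟩
  | succ fuel ih =>
    intro d total res hnd hsz
    by_cases hc : total ≤ limit ∧ 0 < d.size
    · have hne : d.items ≠ [] := by
        intro he
        simp [PySem.Dict.size, he] at hc
      cases hfm : fm d.items with
      | none => exact absurd ((fm_eq_none_iff _).mp hfm) hne
      | some m =>
        have hkw := keywithmaxval_eq hfm
        have hget : d.get? m.1 = some m.2 := by
          obtain ⟨k, v⟩ := m
          exact PySem.Dict.get?_of_mem_items d (fm_mem hfm) hnd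
        have hsorted : sItems d = m :: sItems (d.erase m.1) := by
          rw [sItems, sorted_extract hfm, sItems, erase_items hnd (fm_mem hfm)]
        have hnd' : (d.erase m.1).keys.Nodup := nodup_keys_erase d m.1 hnd
        have hsz' : (d.erase m.1).size ≤ fuel := by
          have : (d.erase m.1).items = d.items.erase m := erase_items hnd (fm_mem hfm)
          have hlen : (d.items.erase m).length = d.items.length - 1 :=
            List.length_erase_of_mem (fm_mem hfm)
          have h1 : 0 < d.items.length := List.length_pos_iff.mpr hne
          show (d.erase m.1).items.length ≤ fuel
          rw [this, hlen]
          have : d.items.length ≤ fuel + 1 := hsz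
          omega
        obtain ⟨d', heq, hnd'', hs''⟩ := ih (d.erase m.1) (total + m.2) (res ++ [m.1]) hnd' hsz'
        refine ⟨d', ?_, hnd'', ?_⟩
        · show greedyGrab limit (fuel+1) total d res = _
          simp only [greedyGrab, if_pos hc, hkw, hget, heq]
          rw [hsorted]
          simp [grabL, hc.1]
        · rw [hsorted]
          simp [grabL, hc.1, hs'']
    · refine ⟨d, ?_, hnd, ?_⟩
      · show greedyGrab limit (fuel+1) total d res = _
        rw [greedyGrab, if_neg hc]
        rcases not_and_or.mp hc with h | h
        · rw [grabL_not_le h]; simp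
        · have : d.items = [] := by
            have : d.size = 0 := by omega
            exact List.eq_nil_of_length_eq_zero this
          have hs : sItems d = [] := by rw [sItems, this]; rfl
          simp [hs, grabL]
      · rcases not_and_or.mp hc with h | h
        · rw [grabL_not_le h]
        · have : d.items = [] := by
            have : d.size = 0 := by omega
            exact List.eq_nil_of_length_eq_zero this
          have hs : sItems d = [] := by rw [sItems, this]; rfl
          simp [hs, grabL]

theorem size_eq_sItems_length (d : PySem.Dict String Int) :
    d.size = (sItems d).length := by
  rw [sItems, PySem.List.length_sorted]; rfl

-- ===== A-side: the outer loop equals batchesF on the sorted items =====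
theorem outer_eq {limit : Int} (hlim : 0 ≤ limit) :
    ∀ fuel (d : PySem.Dict String Int) (out : List (List String)),
      d.keys.Nodup → d.size ≤ fuel →
      greedyOuter limit fuel d out =
        out ++ batchesF limit (sItems d).length (sItems d) := by
  intro fuel
  induction fuel with
  | zero =>
    intro d out hnd hsz
    have h0 : (sItems d).length = 0 := by rw [← size_eq_sItems_length]; omega
    have hnil : sItems d = [] := List.length_eq_zero_iff.mp h0
    simp [greedyOuter, hnil, batchesF]
  | succ fuel ih =>
    intro d out hnd hsz
    by_cases hpos : 0 < d.size
    · have hne : sItems d ≠ [] := by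
        intro he
        rw [size_eq_sItems_length, he] at hpos
        simp at hpos
      obtain ⟨d', heq, hnd', hs'⟩ := grab_eq limit (d.size + 1) d 0 [] hnd (Nat.le_succ _)
      have hlen : (sItems d).length = ((sItems d).length - 1) + 1 := by
        have : 0 < (sItems d).length := List.length_pos_iff.mpr hne
        omega
      have hrest_lt : (grabL limit (sItems d) 0).2.length < (sItems d).length :=
        grabL_rest_lt hlim hne
      show (if 0 < d.size then
          greedyOuter limit fuel (greedyGrab limit (d.size + 1) 0 d []).2
            (out ++ [(greedyGrab limit (d.size + 1) 0 d []).1]) else out) = _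
      rw [if_pos hpos, heq]
      simp only []
      have hds := size_eq_sItems_length d
      rw [ih d' (out ++ [[] ++ (grabL limit (sItems d) 0).1]) hnd'
        (by rw [size_eq_sItems_length, hs']; omega)]
      rw [hs']
      conv_rhs => rw [hlen]
      rw [batchesF, if_neg hne]
      simp only [List.nil_append, List.append_assoc, List.cons_append, List.nil_append]
      congr 2
      exact batchesF_fuel hlim (grabL limit (sItems d) 0).2.length _ _ _ le_rfl
        (by omega) (by omega)
    · have h0 : (sItems d).length = 0 := by rw [← size_eq_sItems_length]; omega
      have hnil : sItems d = [] := List.length_eq_zero_iff.mp h0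
      simp [greedyOuter, hpos, hnil, batchesF]

-- ===== B-side: the fold plus final flush equals batchesF =====
def bFinish (st : List (List String) × List String × Int) : List (List String) :=
  if st.2.1 ≠ [] then st.1 ++ [st.2.1] else st.1

theorem fold_eq {limit : Int} (hlim : 0 ≤ limit) :
    ∀ (s : List (String × Int)) (out : List (List String)) (batch : List String) (total : Int),
      batch ≠ [] →
      bFinish (s.foldl (bStep limit) (out, batch, total)) =
        if total ≤ limit then
          out ++ ((batch ++ (grabL limit s total).1) ::
            batchesF limit s.length (grabL limit s total).2)
        else
          out ++ (batch :: batchesF limit s.length s) := by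
  intro s
  induction s with
  | nil =>
    intro out batch total hb
    simp [bFinish, hb, grabL, batchesF]
  | cons p t ih =>
    intro out batch total hb
    by_cases h : limit < total
    · -- flush, start a new batch with p
      have hstep : bStep limit (out, batch, total) p = (out ++ [batch], [p.1], p.2) := by
        simp [bStep, h]
      rw [List.foldl_cons, hstep, ih (out ++ [batch]) [p.1] p.2 (by simp)]
      rw [if_neg (not_le.mpr h)]
      have hg : grabL limit (p :: t) 0 =
          (p.1 :: (grabL limit t p.2).1, (grabL limit t p.2).2) := by
        simp [grabL, hlim]
      by_cases h2 : p.2 ≤ limit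
      · rw [if_pos h2]
        simp only [List.length_cons, batchesF, if_neg (by simp : ¬ (p :: t : List (String × Int)) = []), hg]
        simp
      · rw [if_neg h2]
        have hr : grabL limit (p :: t) 0 = ([p.1], t) := by rw [hg, grabL_not_le h2]
        simp only [List.length_cons, batchesF, if_neg (by simp : ¬ (p :: t : List (String × Int)) = []), hr]
        simp
    · -- keep extending the current batch
      have hle : total ≤ limit := not_lt.mp h
      have hstep : bStep limit (out, batch, total) p = (out, batch ++ [p.1], total + p.2) := by
        simp [bStep, h]
      rw [List.foldl_cons, hstep, ih out (batch ++ [p.1]) (total + p.2) (by simp)]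
      rw [if_pos hle]
      have hg : grabL limit (p :: t) total =
          (p.1 :: (grabL limit t (total + p.2)).1, (grabL limit t (total + p.2)).2) := by
        simp [grabL, hle]
      by_cases h2 : total + p.2 ≤ limit
      · rw [if_pos h2]
        simp only [hg, List.length_cons]
        rw [batchesF_fuel hlim ((grabL limit t (total + p.2)).2.length) _ t.length (t.length + 1)
          le_rfl (grabL_rest_len _ _ _) (le_trans (grabL_rest_len _ _ _) (Nat.le_succ _))]
        simp
      · rw [if_neg h2]
        have hr : grabL limit (p :: t) total = ([p.1], t) := by rw [hg, grabL_not_le h2]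
        rw [hr, List.length_cons,
          batchesF_fuel hlim t.length t (t.length + 1) t.length le_rfl (Nat.le_succ _) le_rfl]

theorem alt_eq {limit : Int} (hlim : 0 ≤ limit) (mystuff : List (String × Int)) :
    greedy_algo_alt mystuff limit =
      batchesF limit (sItems (PySem.Dict.ofList mystuff)).length
        (sItems (PySem.Dict.ofList mystuff)) := by
  show bFinish ((sItems (PySem.Dict.ofList mystuff)).foldl (bStep limit) ([], [], 0)) = _
  cases hs : sItems (PySem.Dict.ofList mystuff) with
  | nil => simp [bFinish, batchesF]
  | cons p t =>
    have hstep : bStep limit ([], [], 0) p = ([], [p.1], p.2) := by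
      simp [bStep, not_lt.mpr hlim]
    rw [List.foldl_cons, hstep, fold_eq hlim t [] [p.1] p.2 (by simp)]
    have hg : grabL limit (p :: t) 0 =
        (p.1 :: (grabL limit t p.2).1, (grabL limit t p.2).2) := by
      simp [grabL, hlim]
    by_cases h2 : p.2 ≤ limit
    · rw [if_pos h2]
      simp only [List.length_cons, batchesF, if_neg (by simp : ¬ (p :: t : List (String × Int)) = []), hg]
      simp
    · rw [if_neg h2]
      have hr : grabL limit (p :: t) 0 = ([p.1], t) := by rw [hg, grabL_not_le h2]
      simp only [List.length_cons, batchesF, if_neg (by simp : ¬ (p :: t : List (String × Int)) = []), hr]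
      simp

-- ===== VERDICT (by name: the statement is the Claim_ definition above) =====
theorem greedy_algo_spec : Claim_equal_greedy_algo := by
  intro mystuff limit _ hpre
  unfold Spec_greedy_algo
  rcases hpre with rfl | hlim
  · rfl
  · show greedyOuter limit ((PySem.Dict.ofList mystuff).size + 1) (PySem.Dict.ofList mystuff) [] = _
    rw [outer_eq hlim ((PySem.Dict.ofList mystuff).size + 1) (PySem.Dict.ofList mystuff) []
      (PySem.Dict.nodup_keys_ofList mystuff) (Nat.le_succ _)]
    rw [alt_eq hlim]
    simp
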